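-- pv_equiv track=rewrite | github.com/need-singularity/sylvian-singularity | verify/verify_paper_p1_proofs.py | dedekind_psi
-- ===== SOURCE A (Python) =====
-- def dedekind_psi(n):
--     """Dedekind psi function: psi(n) = n * prod(1 + 1/p) for p | n."""
--     result = n
--     p = 2
--     temp = n
--     while p * p <= temp:
--         if temp % p == 0:
--             result = result * (p + 1) // p
--             while temp % p == 0:
--                 temp //= p
--         p += 1
--     if temp > 1:
--         result = result * (temp + 1) // temp
--     return result
-- ===== SOURCE B (Python) =====
-- def dedekind_psi(n):
--     """Dedekind psi: multiplicative recursion psi(n) = psi(n // p**e) * p**(e-1) * (p+1),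
--     peeling the smallest prime factor p of n; n with no prime factors maps to itself."""
--     if n <= 1:
--         return n
--     p = 2
--     while p * p <= n and n % p != 0:
--         p += 1
--     if p * p > n:
--         p = n  # n is prime
--     m, q = n, 1
--     while m % p == 0:
--         m //= p
--         q *= p
--     return dedekind_psi(m) * (q // p) * (p + 1)
-- ===== Notes on version B (the rewrite author's own statement) =====
-- stated objective: alternative
-- what changed: B replaces A's single fused loop (scan p up to the square root while accumulating result*(p+1)//p in place) by a multiplicative recursion: a search loop finds the smallest prime factor p, a strip loop removes it completely collecting q = p^e, and the result is dedekind_psi(n // q) * (q // p) * (p + 1), arguments without a prime factor being returned unchanged by the base case.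
import Mathlib
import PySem

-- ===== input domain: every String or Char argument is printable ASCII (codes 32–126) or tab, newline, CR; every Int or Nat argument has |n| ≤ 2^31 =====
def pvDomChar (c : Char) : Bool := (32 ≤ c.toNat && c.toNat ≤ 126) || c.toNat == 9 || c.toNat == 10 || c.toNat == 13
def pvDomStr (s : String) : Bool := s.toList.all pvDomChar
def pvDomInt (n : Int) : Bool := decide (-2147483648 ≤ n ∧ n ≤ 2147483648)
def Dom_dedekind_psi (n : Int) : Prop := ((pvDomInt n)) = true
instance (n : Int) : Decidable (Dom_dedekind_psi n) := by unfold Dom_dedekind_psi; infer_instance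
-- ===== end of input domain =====

-- B replaces A's fused trial-division loop by a multiplicative recursion peeling the smallest
-- prime factor: psi(n) = psi(n // p^e) * p^(e-1) * (p+1); objective: alternative, same cost.


-- quotient facts used by the termination proofs of both ports' loops
theorem pvFloordiv_bounds (p temp : Int) (hp : 2 ≤ p) (ht : 0 < temp)
    (hm : PySem.Int.mod temp p = 0) :
    0 < PySem.Int.floordiv temp p ∧ PySem.Int.floordiv temp p < temp := by
  have hkey := PySem.Int.floordiv_mul_add_mod temp p
  rw [hm] at hkey
  set q := PySem.Int.floordiv temp p with hq
  have hqp : q * p = temp := by omega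
  constructor
  · by_contra h
    push Not at h
    nlinarith
  · nlinarith [(show 0 < q by by_contra h; push Not at h; nlinarith)]

-- ===== PORT A =====
-- inner loop 'while temp % p == 0: temp //= p'; the '2 ≤ p ∧ 0 < temp' conjuncts only
-- make the recursion total — they hold at every call site the outer loop reaches
theorem pvDivOut_dec (p temp : Int) (h : 2 ≤ p ∧ 0 < temp ∧ PySem.Int.mod temp p = 0) :
    (PySem.Int.floordiv temp p).toNat < temp.toNat := by
  have := pvFloordiv_bounds p temp h.1 h.2.1 h.2.2
  omega

def pvDivOut (p temp : Int) : Int :=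
  if h : 2 ≤ p ∧ 0 < temp ∧ PySem.Int.mod temp p = 0 then
    pvDivOut p (PySem.Int.floordiv temp p)
  else temp
termination_by temp.toNat
decreasing_by
  exact pvDivOut_dec p temp h

theorem pvDivOut_bounds (p temp : Int) (ht : 0 < temp) :
    0 < pvDivOut p temp ∧ pvDivOut p temp ≤ temp := by
  induction temp using pvDivOut.induct (p := p) with
  | case1 temp h ih =>
    have hb := pvFloordiv_bounds p temp h.1 h.2.1 h.2.2
    rw [pvDivOut, dif_pos h]
    have := ih hb.1
    omega
  | case2 temp h =>
    rw [pvDivOut, dif_neg h]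
    omega

-- outer loop of A, threading (result, temp); '2 ≤ p' again only makes the recursion total
theorem pvALoop_dec1 (p temp : Int) (h : 2 ≤ p ∧ p * p ≤ temp) :
    (pvDivOut p temp - (p + 1)).toNat < (temp - p).toNat := by
  have htpos : 0 < temp := by nlinarith [h.1, h.2]
  have hpt : p < temp := by nlinarith [h.1, h.2]
  have := pvDivOut_bounds p temp htpos
  omega

theorem pvALoop_dec2 (p temp : Int) (h : 2 ≤ p ∧ p * p ≤ temp) :
    (temp - (p + 1)).toNat < (temp - p).toNat := by
  have hpt : p < temp := by nlinarith [h.1, h.2]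
  omega

def pvALoop (p temp result : Int) : Int × Int :=
  if h : 2 ≤ p ∧ p * p ≤ temp then
    if PySem.Int.mod temp p = 0 then
      pvALoop (p + 1) (pvDivOut p temp) (PySem.Int.floordiv (result * (p + 1)) p)
    else
      pvALoop (p + 1) temp result
  else (result, temp)
termination_by (temp - p).toNat
decreasing_by
  · exact pvALoop_dec1 p temp h
  · exact pvALoop_dec2 p temp h

def dedekind_psi (n : Int) : Int :=
  let rt := pvALoop 2 n n
  if 1 < rt.2 then PySem.Int.floordiv (rt.1 * (rt.2 + 1)) rt.2 else rt.1

-- ===== PORT B =====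
-- 'while p * p <= n and n % p != 0: p += 1'; the '2 ≤ p' conjunct only makes it total
def pvSpfLoop (p n : Int) : Int :=
  if h : 2 ≤ p ∧ p * p ≤ n ∧ PySem.Int.mod n p ≠ 0 then pvSpfLoop (p + 1) n else p
termination_by (n - p).toNat
decreasing_by
  exact pvALoop_dec2 p n ⟨h.1, h.2.1⟩

-- exit facts of the search loop, cited by dedekind_psi_alt's termination proof
theorem pvSpfLoop_ge (p n : Int) : p ≤ pvSpfLoop p n := by
  induction p using pvSpfLoop.induct (n := n) with
  | case1 p h ih => rw [pvSpfLoop, dif_pos h]; omega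
  | case2 p h => rw [pvSpfLoop, dif_neg h]

theorem pvSpfLoop_exit (p n : Int) :
    ¬ (2 ≤ pvSpfLoop p n ∧ pvSpfLoop p n * pvSpfLoop p n ≤ n ∧
        PySem.Int.mod n (pvSpfLoop p n) ≠ 0) := by
  induction p using pvSpfLoop.induct (n := n) with
  | case1 p h ih => rw [pvSpfLoop, dif_pos h]; exact ih
  | case2 p h => rw [pvSpfLoop, dif_neg h]; exact h

-- 'while m % p == 0: m //= p; q *= p'; the '2 ≤ p ∧ 0 < m' conjuncts only make it total
def pvStrip (p m q : Int) : Int × Int :=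
  if h : 2 ≤ p ∧ 0 < m ∧ PySem.Int.mod m p = 0 then
    pvStrip p (PySem.Int.floordiv m p) (q * p)
  else (m, q)
termination_by m.toNat
decreasing_by
  exact pvDivOut_dec p m h

theorem pvStrip_fst_bounds (p : Int) : ∀ m q : Int, 0 < m →
    0 < (pvStrip p m q).1 ∧ (pvStrip p m q).1 ≤ m := by
  intro m q
  induction m, q using pvStrip.induct (p := p) with
  | case1 m q h ih =>
    intro _
    have hb := pvFloordiv_bounds p m h.1 h.2.1 h.2.2
    rw [pvStrip, dif_pos h]
    have := ih hb.1
    omega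
  | case2 m q h =>
    intro hm
    rw [pvStrip, dif_neg h]
    omega

-- the recursive call's argument shrinks, cited by dedekind_psi_alt's termination proof
theorem pvAlt_rec_bounds (n : Int) (hn : 1 < n) :
    0 < (pvStrip (if n < pvSpfLoop 2 n * pvSpfLoop 2 n then n else pvSpfLoop 2 n) n 1).1 ∧
    (pvStrip (if n < pvSpfLoop 2 n * pvSpfLoop 2 n then n else pvSpfLoop 2 n) n 1).1 < n := by
  have hpl2 : 2 ≤ pvSpfLoop 2 n := pvSpfLoop_ge 2 n
  set p := if n < pvSpfLoop 2 n * pvSpfLoop 2 n then n else pvSpfLoop 2 n with hp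
  have hp2 : 2 ≤ p := by rw [hp]; split <;> omega
  have hmod : PySem.Int.mod n p = 0 := by
    rw [hp]; split
    · exact (PySem.Int.mod_eq_zero_iff_dvd n n).mpr dvd_rfl
    · have := pvSpfLoop_exit 2 n
      by_contra hc
      exact this ⟨hpl2, by omega, hc⟩
  have hg : 2 ≤ p ∧ 0 < n ∧ PySem.Int.mod n p = 0 := ⟨hp2, by omega, hmod⟩
  rw [pvStrip, dif_pos hg]
  have hfb := pvFloordiv_bounds p n hp2 (by omega) hmod
  have := pvStrip_fst_bounds p (PySem.Int.floordiv n p) (1 * p) hfb.1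
  omega

theorem pvAlt_dec (n : Int) (hn : ¬ n ≤ 1) :
    (pvStrip (if n < pvSpfLoop 2 n * pvSpfLoop 2 n then n else pvSpfLoop 2 n) n 1).1.toNat <
      n.toNat := by
  have := pvAlt_rec_bounds n (by omega)
  omega

def dedekind_psi_alt (n : Int) : Int :=
  if hn : n ≤ 1 then n
  else
    let pl := pvSpfLoop 2 n
    let p := if n < pl * pl then n else pl
    let mq := pvStrip p n 1
    dedekind_psi_alt mq.1 * PySem.Int.floordiv mq.2 p * (p + 1)
termination_by n.toNat
decreasing_by
  simp only [dite_eq_ite]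
  exact pvAlt_dec n hn

-- ===== PRECONDITION & SPEC =====
def Spec_dedekind_psi (n : Int) (out : Int) : Prop := out = dedekind_psi_alt n
instance (n : Int) (out : Int) : Decidable (Spec_dedekind_psi n out) := by unfold Spec_dedekind_psi; infer_instance

-- ===== CLAIM (what is proved, stated in full; the proofs are below) =====
def Claim_equal_dedekind_psi : Prop := ∀ (n : Int), Dom_dedekind_psi n → Spec_dedekind_psi n (dedekind_psi n)

-- ===== LEMMAS AND PROOFS =====
-- exact division of a known multiple
theorem pvFdivExact (a p : Int) (hp : p ≠ 0) : PySem.Int.floordiv (a * p) p = a := by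
  simp [PySem.Int.floordiv]
  exact Int.mul_fdiv_cancel a hp

theorem pvDivOut_dvd (p temp : Int) : pvDivOut p temp ∣ temp := by
  induction temp using pvDivOut.induct (p := p) with
  | case1 temp h ih =>
    rw [pvDivOut, dif_pos h]
    have hkey := PySem.Int.floordiv_mul_add_mod temp p
    rw [h.2.2] at hkey
    exact Dvd.dvd.trans ih ⟨p, by omega⟩
  | case2 temp h => rw [pvDivOut, dif_neg h]

theorem pvDivOut_not_dvd (p temp : Int) (hp : 2 ≤ p) : ∀ _ : 0 < temp,
    PySem.Int.mod (pvDivOut p temp) p ≠ 0 := by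
  induction temp using pvDivOut.induct (p := p) with
  | case1 temp h ih =>
    intro _
    rw [pvDivOut, dif_pos h]
    exact ih (pvFloordiv_bounds p temp h.1 h.2.1 h.2.2).1
  | case2 temp h =>
    intro ht
    rw [pvDivOut, dif_neg h]
    intro hc
    exact h ⟨hp, ht, hc⟩

theorem pvStrip_fst (p : Int) : ∀ m q : Int, (pvStrip p m q).1 = pvDivOut p m := by
  intro m q
  induction m, q using pvStrip.induct (p := p) with
  | case1 m q h ih => rw [pvStrip, dif_pos h, pvDivOut, dif_pos h]; exact ih
  | case2 m q h => rw [pvStrip, dif_neg h, pvDivOut, dif_neg h]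

theorem pvStrip_mul (p : Int) : ∀ m q : Int,
    (pvStrip p m q).1 * (pvStrip p m q).2 = m * q := by
  intro m q
  induction m, q using pvStrip.induct (p := p) with
  | case1 m q h ih =>
    rw [pvStrip, dif_pos h]
    have hkey := PySem.Int.floordiv_mul_add_mod m p
    rw [h.2.2] at hkey
    rw [ih]
    have hm : PySem.Int.floordiv m p * p = m := by omega
    conv_rhs => rw [← hm]
    ring
  | case2 m q h => rw [pvStrip, dif_neg h]

theorem pvStrip_snd_dvd (p : Int) : ∀ m q : Int, q ∣ (pvStrip p m q).2 := by
  intro m q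
  induction m, q using pvStrip.induct (p := p) with
  | case1 m q h ih =>
    rw [pvStrip, dif_pos h]
    exact dvd_trans (dvd_mul_right q p) ih
  | case2 m q h => rw [pvStrip, dif_neg h]

theorem pvSpfLoop_min (p n : Int) : ∀ d, p ≤ d → d < pvSpfLoop p n → PySem.Int.mod n d ≠ 0 := by
  induction p using pvSpfLoop.induct (n := n) with
  | case1 p h ih =>
    rw [pvSpfLoop, dif_pos h]
    intro d hd hdl
    by_cases hdp : d = p
    · rw [hdp]; exact h.2.2
    · exact ih d (by omega) hdl
  | case2 p h =>
    rw [pvSpfLoop, dif_neg h]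
    intro d hd hdl hc
    omega

-- A's loop is linear in the seed: running it on t * c is the run on t, scaled by c
theorem pvALoop_scale : ∀ p t r : Int, ∀ c : Int,
    pvALoop p t (t * c) = ((pvALoop p t t).1 * c, (pvALoop p t t).2) := by
  intro p t r
  induction p, t, r using pvALoop.induct with
  | case1 p t r h hmod ih =>
    intro c
    have ht : 0 < t := by nlinarith [h.1, h.2]
    have hkey := PySem.Int.floordiv_mul_add_mod t p
    rw [hmod] at hkey
    set k := PySem.Int.floordiv t p with hk
    have hkp : t = k * p := by omega
    have hp0 : p ≠ 0 := by omega
    have ht2 : pvDivOut p t = pvDivOut p k := by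
      rw [pvDivOut, dif_pos ⟨h.1, ht, hmod⟩, hk]
    obtain ⟨d, hd⟩ : pvDivOut p t ∣ k := ht2 ▸ pvDivOut_dvd p k
    conv_lhs => rw [pvALoop]
    rw [dif_pos h, if_pos hmod]
    conv_rhs => rw [pvALoop]
    rw [dif_pos h, if_pos hmod]
    have e1 : PySem.Int.floordiv (t * c * (p + 1)) p = pvDivOut p t * (d * c * (p + 1)) := by
      rw [show t * c * (p + 1) = (k * c * (p + 1)) * p by rw [hkp]; ring,
        pvFdivExact _ p hp0, hd]; ring
    have e2 : PySem.Int.floordiv (t * (p + 1)) p = pvDivOut p t * (d * (p + 1)) := by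
      rw [show t * (p + 1) = (k * (p + 1)) * p by rw [hkp]; ring,
        pvFdivExact _ p hp0, hd]; ring
    rw [e1, e2, ih, ih]
    exact congrArg (fun x => (x, (pvALoop (p+1) (pvDivOut p t) (pvDivOut p t)).2)) (by ring)
  | case2 p t r h hmod ih =>
    intro c
    conv_lhs => rw [pvALoop]
    rw [dif_pos h, if_neg hmod]
    conv_rhs => rw [pvALoop]
    rw [dif_pos h, if_neg hmod]
    exact ih c
  | case3 p t r h =>
    intro c
    conv_lhs => rw [pvALoop]
    rw [dif_neg h]
    conv_rhs => rw [pvALoop]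
    rw [dif_neg h]

-- the final temp always divides the accumulated result (seeded with temp itself)
theorem pvALoop_snd_dvd : ∀ p t r : Int,
    (pvALoop p t t).2 ∣ (pvALoop p t t).1 := by
  intro p t r
  induction p, t, r using pvALoop.induct with
  | case1 p t r h hmod ih =>
    have ht : 0 < t := by nlinarith [h.1, h.2]
    have hkey := PySem.Int.floordiv_mul_add_mod t p
    rw [hmod] at hkey
    set k := PySem.Int.floordiv t p with hk
    have hkp : t = k * p := by omega
    have hp0 : p ≠ 0 := by omega
    have ht2 : pvDivOut p t = pvDivOut p k := by
      rw [pvDivOut, dif_pos ⟨h.1, ht, hmod⟩, hk]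
    obtain ⟨d, hd⟩ : pvDivOut p t ∣ k := ht2 ▸ pvDivOut_dvd p k
    rw [pvALoop, dif_pos h, if_pos hmod]
    have e2 : PySem.Int.floordiv (t * (p + 1)) p = pvDivOut p t * (d * (p + 1)) := by
      rw [show t * (p + 1) = (k * (p + 1)) * p by rw [hkp]; ring,
        pvFdivExact _ p hp0, hd]; ring
    rw [e2, pvALoop_scale (p + 1) (pvDivOut p t) r (d * (p + 1))]
    exact Dvd.dvd.mul_right ih _
  | case2 p t r h hmod ih =>
    rw [pvALoop, dif_pos h, if_neg hmod]
    exact ih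
  | case3 p t r h =>
    rw [pvALoop, dif_neg h]

-- when nothing at or above p divides t, the loop is a no-op
theorem pvALoop_nodiv : ∀ p t r : Int,
    (∀ d, p ≤ d → d * d ≤ t → PySem.Int.mod t d ≠ 0) → pvALoop p t r = (r, t) := by
  intro p t r
  induction p, t, r using pvALoop.induct with
  | case1 p t r h hmod ih =>
    intro hnd
    exact absurd hmod (hnd p le_rfl h.2)
  | case2 p t r h hmod ih =>
    intro hnd
    rw [pvALoop, dif_pos h, if_neg hmod]
    exact ih fun d hd => hnd d (by omega)
  | case3 p t r h =>
    intro _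
    rw [pvALoop, dif_neg h]

-- the loop may be started at any p' ≤ the first divisor: the skipped range is a no-op
theorem pvALoop_skip : ∀ (k : Nat) (p pl t r : Int), 2 ≤ p → p + k = pl →
    (∀ d, p ≤ d → d < pl → PySem.Int.mod t d ≠ 0) → pvALoop p t r = pvALoop pl t r := by
  intro k
  induction k with
  | zero =>
    intro p pl t r _ hk _
    have : p = pl := by omega
    rw [this]
  | succ k ih =>
    intro p pl t r hp2 hk hnd
    have hppl : p < pl := by omega
    by_cases hpp : p * p ≤ t
    · rw [pvALoop, dif_pos ⟨hp2, hpp⟩, if_neg (hnd p le_rfl hppl)]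
      exact ih (p + 1) pl t r (by omega) (by omega) fun d hd => hnd d (by omega)
    · rw [pvALoop, dif_neg (by intro hc; exact hpp hc.2)]
      rw [pvALoop, dif_neg (by
        intro hc
        have : p * p ≤ pl * pl := by nlinarith
        exact hpp (by omega))]

-- main equivalence, by strong induction on n
theorem pvAeqB : ∀ (N : Nat) (n : Int), n.toNat ≤ N →
    dedekind_psi n = dedekind_psi_alt n := by
  intro N
  induction N with
  | zero =>
    intro n hn
    have hn1 : n ≤ 1 := by omega
    rw [dedekind_psi_alt, dif_pos hn1]
    show (let rt := pvALoop 2 n n; if 1 < rt.2 then _ else rt.1) = n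
    rw [pvALoop, dif_neg (by intro hc; omega)]
    simp only []
    rw [if_neg (by omega)]
  | succ N ih =>
    intro n hn
    by_cases hn1 : n ≤ 1
    · rw [dedekind_psi_alt, dif_pos hn1]
      show (let rt := pvALoop 2 n n; if 1 < rt.2 then _ else rt.1) = n
      rw [pvALoop, dif_neg (by intro hc; omega)]
      simp only []
      rw [if_neg (by omega)]
    · push Not at hn1
      have hn0 : 0 < n := by omega
      have hpl2 : 2 ≤ pvSpfLoop 2 n := pvSpfLoop_ge 2 n
      set pl := pvSpfLoop 2 n with hpl
      rw [dedekind_psi_alt, dif_neg (by omega)]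
      simp only [← hpl]
      by_cases hps : n < pl * pl
      · -- n has no divisor ≤ √n: A multiplies once by (n+1)/n, B peels p = n to m = 1
        rw [if_pos hps]
        have hA : pvALoop 2 n n = (n, n) := by
          apply pvALoop_nodiv
          intro d hd hdd hm
          have hdp : d < pl := by nlinarith
          exact pvSpfLoop_min 2 n d hd hdp hm
        unfold dedekind_psi
        rw [hA]
        simp only []
        rw [if_pos hn1, show n * (n + 1) = (n + 1) * n by ring, pvFdivExact _ n (by omega)]
        have hfnn : PySem.Int.floordiv n n = 1 := by
          have := pvFdivExact 1 n (by omega)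
          simpa using this
        have hs1 : pvStrip n n 1 = (1, n) := by
          rw [pvStrip, dif_pos ⟨by omega, hn0, (PySem.Int.mod_eq_zero_iff_dvd n n).mpr dvd_rfl⟩,
            hfnn]
          rw [pvStrip, dif_neg (by
            rintro ⟨-, -, hc⟩
            have := (PySem.Int.mod_eq_zero_iff_dvd 1 n).mp hc
            have := Int.le_of_dvd one_pos this
            omega)]
          norm_num
        rw [hs1]
        simp only []
        rw [hfnn]
        norm_num
        rw [dedekind_psi_alt, dif_pos (by omega : (1:Int) ≤ 1)]
        ring
      · -- pl is the smallest prime factor; both sides factor as (value at m) * s * (pl+1)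
        push Not at hps
        rw [if_neg (by omega)]
        have hmod : PySem.Int.mod n pl = 0 := by
          by_contra hc
          exact pvSpfLoop_exit 2 n ⟨hpl2, hps, hc⟩
        set M := (pvStrip pl n 1).1 with hM
        set Q := (pvStrip pl n 1).2 with hQ
        have hMdiv : M = pvDivOut pl n := pvStrip_fst pl n 1
        have hMQ : M * Q = n := by rw [hM, hQ, pvStrip_mul]; ring
        have hMb : 0 < M ∧ M ≤ n := hMdiv ▸ pvDivOut_bounds pl n hn0
        have hMnd : PySem.Int.mod M pl ≠ 0 := hMdiv ▸ pvDivOut_not_dvd pl n hpl2 hn0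
        have hplQ : pl ∣ Q := by
          rw [hQ, pvStrip, dif_pos ⟨hpl2, hn0, hmod⟩]
          simpa using pvStrip_snd_dvd pl (PySem.Int.floordiv n pl) (1 * pl)
        obtain ⟨s, hsQ⟩ := hplQ
        have hQpos : 0 < Q := by
          by_contra hq
          push Not at hq
          nlinarith [hMb.1]
        have hspos : 0 < s := by nlinarith
        have hQge : pl ≤ Q := Int.le_of_dvd hQpos ⟨s, hsQ⟩
        have hMlt : M < n := by nlinarith [hMb.1]
        have hfQ : PySem.Int.floordiv Q pl = s := by
          rw [hsQ, show pl * s = s * pl by ring]; exact pvFdivExact s pl (by omega)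
        -- A's loop on n = skipped prefix, one division step at pl, then the scaled run on M
        have hAskip : pvALoop 2 n n = pvALoop pl n n := by
          apply pvALoop_skip (pl - 2).toNat 2 pl n n (by omega) (by omega)
          intro d hd hdl
          exact pvSpfLoop_min 2 n d hd hdl
        have hMdvdn : M ∣ n := ⟨Q, hMQ.symm⟩
        have hMskip : pvALoop 2 M M = pvALoop (pl + 1) M M := by
          apply pvALoop_skip (pl - 1).toNat 2 (pl + 1) M M (by omega) (by omega)
          intro d hd hdl
          by_cases hdp : d = pl
          · rw [hdp]; exact hMnd
          · intro hc
            have hdM : d ∣ M := (PySem.Int.mod_eq_zero_iff_dvd M d).mp hc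
            exact pvSpfLoop_min 2 n d hd (by omega) ((PySem.Int.mod_eq_zero_iff_dvd n d).mpr
              (dvd_trans hdM hMdvdn))
        have hseed : PySem.Int.floordiv (n * (pl + 1)) pl = M * (s * (pl + 1)) := by
          rw [show n * (pl + 1) = (M * s * (pl + 1)) * pl by rw [← hMQ, hsQ]; ring,
            pvFdivExact _ pl (by omega)]; ring
        have hstep : pvALoop pl n n =
            ((pvALoop 2 M M).1 * (s * (pl + 1)), (pvALoop 2 M M).2) := by
          rw [pvALoop, dif_pos ⟨hpl2, hps⟩, if_pos hmod, ← hMdiv, hseed,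
            pvALoop_scale (pl + 1) M 0 (s * (pl + 1)), hMskip]
        set F := (pvALoop 2 M M).1 with hF
        set T := (pvALoop 2 M M).2 with hT
        have hTF : T ∣ F := by
          have := pvALoop_snd_dvd 2 M 0
          rw [← hF, ← hT] at this; exact this
        have hAn : dedekind_psi n = dedekind_psi M * (s * (pl + 1)) := by
          unfold dedekind_psi
          rw [hAskip, hstep]
          simp only [← hF, ← hT]
          obtain ⟨u, hu⟩ := hTF
          by_cases hT1 : 1 < T
          · rw [if_pos hT1, if_pos hT1,
              show F * (s * (pl + 1)) * (T + 1) = (u * (s * (pl + 1)) * (T + 1)) * T by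
                rw [hu]; ring,
              show F * (T + 1) = (u * (T + 1)) * T by rw [hu]; ring,
              pvFdivExact _ T (by omega), pvFdivExact _ T (by omega)]
            ring
          · rw [if_neg hT1, if_neg hT1]
        rw [hAn, ih M (by omega), hfQ]
        ring

-- ===== VERDICT (by name: the statement is the Claim_ definition above) =====
theorem dedekind_psi_spec : Claim_equal_dedekind_psi := by
  intro n _
  exact pvAeqB n.toNat n le_rfl
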